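-- pv_equiv track=rewrite | github.com/nerdneilsfield/sluice-pipeline | sluice/sinks/feishu.py | _truncate_post_array
-- ===== SOURCE A (Python) =====
-- def _truncate_post_array(arr: list[list[dict]], max_chars: int) -> list[list[dict]]:
--     total = 0
--     result: list[list[dict]] = []
--     for line in arr:
--         line_len = sum(len(seg.get("text", "")) for seg in line)
--         if total + line_len > max_chars:
--             if not result:
--                 result.append(_split_post_line(line, max_chars)[0])
--             break
--         result.append(line)
--         total += line_len
--     return result
--
-- def _split_post_line(line: list[dict], max_chars: int) -> list[list[dict]]:
--     chunks: list[list[dict]] = []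
--     cur: list[dict] = []
--     cur_chars = 0
--     for seg in line:
--         text = str(seg.get("text", ""))
--         if not text:
--             cur.append(seg)
--             continue
--         pos = 0
--         while pos < len(text):
--             if cur_chars >= max_chars:
--                 chunks.append(cur)
--                 cur = []
--                 cur_chars = 0
--             room = max_chars - cur_chars
--             part = text[pos : pos + room]
--             next_seg = dict(seg)
--             next_seg["text"] = part
--             cur.append(next_seg)
--             cur_chars += len(part)
--             pos += len(part)
--     if cur:
--         chunks.append(cur)
--     return chunks
-- ===== SOURCE B (Python) =====
-- def _truncate_post_array(arr: list[list[dict]], max_chars: int) -> list[list[dict]]: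
--     # measure -> prefix-sum table -> locate cutoff -> slice (instead of a fused accumulate-and-break loop)
--     lengths = [sum(len(seg.get("text", "")) for seg in line) for line in arr]
--     prefix = []
--     s = 0
--     for L in lengths:
--         s += L
--         prefix.append(s)
--     cutoff = next((i for i, c in enumerate(prefix) if c > max_chars), len(arr))
--     if cutoff == 0 and arr:
--         return [_first_chunk(arr[0], max_chars)]
--     return arr[:cutoff]
--
-- def _first_chunk(line: list[dict], max_chars: int) -> list[dict]:
--     # first chunk of the split line, computed directly (no need to build the later chunks)
--     chunk: list[dict] = []
--     used = 0
--     for seg in line: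
--         text = str(seg.get("text", ""))
--         if not text:
--             chunk.append(seg)
--             continue
--         if used >= max_chars:
--             break
--         part = text[: max_chars - used]
--         next_seg = dict(seg)
--         next_seg["text"] = part
--         chunk.append(next_seg)
--         used += len(part)
--         if len(part) < len(text):
--             break
--     return chunk
-- ===== Notes on version B (the rewrite author's own statement) =====
-- stated objective: alternative
-- what changed: Replaces A's fused accumulate-and-break loop by a measure / prefix-sum-table / locate-cutoff / slice decomposition, and replaces the _split_post_line[0] fallback by a direct always-terminating first-chunk computation.
import Mathlib
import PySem

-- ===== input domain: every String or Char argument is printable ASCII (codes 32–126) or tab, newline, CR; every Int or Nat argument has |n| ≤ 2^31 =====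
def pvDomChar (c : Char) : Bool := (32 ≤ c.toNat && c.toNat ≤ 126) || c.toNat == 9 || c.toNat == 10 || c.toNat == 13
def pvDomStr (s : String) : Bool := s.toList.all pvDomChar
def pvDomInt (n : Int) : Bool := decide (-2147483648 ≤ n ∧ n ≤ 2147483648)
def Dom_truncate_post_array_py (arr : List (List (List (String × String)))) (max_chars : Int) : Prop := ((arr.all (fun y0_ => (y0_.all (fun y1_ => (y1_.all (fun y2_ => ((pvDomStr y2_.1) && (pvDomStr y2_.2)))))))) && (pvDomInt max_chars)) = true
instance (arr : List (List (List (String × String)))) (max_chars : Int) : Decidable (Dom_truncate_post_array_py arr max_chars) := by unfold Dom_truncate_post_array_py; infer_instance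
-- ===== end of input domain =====

-- B replaces A's fused accumulate-and-break loop by a measure / prefix-sum table / locate-cutoff / slice
-- decomposition, with a direct first-chunk computation for the first-line-overflow fallback (objective: alternative).


-- ===== PORT A =====
-- shared helper: seg.get("text", "") on the assoc-list dict (first match)
def segText (seg : List (String × String)) : String :=
  match seg.find? (fun p => p.1 == "text") with
  | some p => p.2
  | none => ""

-- shared helper: next_seg = dict(seg); next_seg["text"] = part (overwrite keeps position, new key appends)
def setSegText (seg : List (String × String)) (v : String) : List (String × String) :=
  if seg.any (fun p => p.1 == "text") then
    seg.map (fun p => if p.1 == "text" then (p.1, v) else p)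
  else seg ++ [("text", v)]

-- shared helper: line_len = sum(len(seg.get("text", "")) for seg in line)
def lineLen (line : List (List (String × String))) : Int :=
  line.foldl (fun acc seg => acc + PySem.Str.len (segText seg)) 0

-- the 'while pos < len(text)' loop of A's _split_post_line; fuel = len(text) suffices whenever
-- max_chars > 0 (on Pre_ the loop is only entered with max_chars > 0; fuel exhaustion is unreachable there)
def splitSegLoop (mc : Int) (seg : List (String × String)) (text : String) :
    Nat → Int → List (List (List (String × String))) → List (List (String × String)) → Int →
    List (List (List (String × String))) × List (List (String × String)) × Int
  | 0, _, chunks, cur, cc => (chunks, cur, cc)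
  | fuel + 1, pos, chunks, cur, cc =>
    if pos < PySem.Str.len text then
      let st := if cc ≥ mc then (chunks ++ [cur], ([] : List (List (String × String))), (0 : Int))
                else (chunks, cur, cc)
      let room := mc - st.2.2
      let part := PySem.Str.slice text (some pos) (some (pos + room))
      let nextSeg := setSegText seg part
      splitSegLoop mc seg text fuel (pos + PySem.Str.len part)
        st.1 (st.2.1 ++ [nextSeg]) (st.2.2 + PySem.Str.len part)
    else (chunks, cur, cc)

-- A's helper _split_post_line
def splitPostLine (line : List (List (String × String))) (mc : Int) :
    List (List (List (String × String))) :=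
  let st := line.foldl
    (fun (st : List (List (List (String × String))) × List (List (String × String)) × Int) seg =>
      let text := segText seg
      if text = "" then (st.1, st.2.1 ++ [seg], st.2.2)
      else splitSegLoop mc seg text text.toList.length 0 st.1 st.2.1 st.2.2)
    ([], [], 0)
  if st.2.1 ≠ [] then st.1 ++ [st.2.1] else st.1

-- A's main loop (for … with break → structural recursion over arr carrying total and result)
def truncAGo (mc : Int) :
    List (List (List (String × String))) → Int → List (List (List (String × String))) →
    List (List (List (String × String)))
  | [], _, result => result
  | line :: rest, total, result =>
    let line_len := lineLen line
    if total + line_len > mc then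
      if result = [] then
        -- _split_post_line(line, max_chars)[0]; Python raises IndexError when the list is empty (outside Pre_)
        match splitPostLine line mc with
        | c :: _ => result ++ [c]
        | [] => result
      else result
    else truncAGo mc rest (total + line_len) (result ++ [line])

def truncate_post_array_py (arr : List (List (List (String × String)))) (max_chars : Int) :
    List (List (List (String × String))) :=
  truncAGo max_chars arr 0 []

-- ===== PORT B =====
-- B's helper _first_chunk: the first chunk of the split line, computed directly
def firstChunkGo (mc : Int) :
    List (List (String × String)) → List (List (String × String)) → Int →
    List (List (String × String))
  | [], chunk, _ => chunk
  | seg :: rest, chunk, used =>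
    let text := segText seg
    if text = "" then firstChunkGo mc rest (chunk ++ [seg]) used
    else if used ≥ mc then chunk
    else
      let part := PySem.Str.slice text none (some (mc - used))
      let chunk' := chunk ++ [setSegText seg part]
      if PySem.Str.len part < PySem.Str.len text then chunk'
      else firstChunkGo mc rest chunk' (used + PySem.Str.len part)

def truncate_post_array_py_alt (arr : List (List (List (String × String)))) (max_chars : Int) :
    List (List (List (String × String))) :=
  let lengths := arr.map lineLen
  let pref := (lengths.foldl (fun (p : Int × List Int) L => (p.1 + L, p.2 ++ [p.1 + L])) (0, [])).2
  let cutoff : Nat :=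
    match pref.findIdx? (fun c => decide (c > max_chars)) with
    | some i => i
    | none => arr.length
  if cutoff = 0 ∧ arr ≠ [] then
    match arr with
    | h :: _ => [firstChunkGo max_chars h [] 0]
    | [] => []
  else arr.take cutoff

-- ===== PRECONDITION & SPEC =====
-- Pre_ excludes exactly the inputs where Python A does not return: with max_chars ≤ 0 a first-line
-- overflow calls _split_post_line, which loops forever on any nonempty text (zero-width slices) or
-- raises IndexError on an empty line; A returns normally iff max_chars > 0, or arr = [], or
-- max_chars = 0 with a zero-length first line, or max_chars < 0 with a nonempty first line of empty texts.
def Pre_truncate_post_array_py (arr : List (List (List (String × String)))) (max_chars : Int) : Prop :=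
  0 < max_chars ∨ arr = [] ∨
  (max_chars = 0 ∧ lineLen (arr.headD []) = 0) ∨
  (max_chars < 0 ∧ arr ≠ [] ∧ arr.headD [] ≠ [] ∧ ∀ seg ∈ arr.headD [], segText seg = "")
instance (arr : List (List (List (String × String)))) (max_chars : Int) : Decidable (Pre_truncate_post_array_py arr max_chars) := by unfold Pre_truncate_post_array_py; infer_instance

def pvWitness_truncate_post_array_py : (List (List (List (String × String)))) × Int :=
  ([[[("text", "hello")], [("text", " world")]], [[("text", "bye")]]], 7)

def Spec_truncate_post_array_py (arr : List (List (List (String × String)))) (max_chars : Int) (out : List (List (List (String × String)))) : Prop := out = truncate_post_array_py_alt arr max_chars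
instance (arr : List (List (List (String × String)))) (max_chars : Int) (out : List (List (List (String × String)))) : Decidable (Spec_truncate_post_array_py arr max_chars out) := by unfold Spec_truncate_post_array_py; infer_instance

-- ===== CLAIM (what is proved, stated in full; the proofs are below) =====
def Claim_equal_truncate_post_array_py : Prop := ∀ (arr : List (List (List (String × String)))) (max_chars : Int), Dom_truncate_post_array_py arr max_chars → Pre_truncate_post_array_py arr max_chars → Spec_truncate_post_array_py arr max_chars (truncate_post_array_py arr max_chars)

-- ===== LEMMAS AND PROOFS =====
-- index of the first line whose running total overflows (arr.length if none): the common core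
def cutIdx (mc : Int) : List (List (List (String × String))) → Int → Nat
  | [], _ => 0
  | l :: rest, total =>
    if total + lineLen l > mc then 0 else cutIdx mc rest (total + lineLen l) + 1

lemma truncAGo_eq (mc : Int) (arr : List (List (List (String × String))))
    (total : Int) (result : List (List (List (String × String)))) :
    truncAGo mc arr total result =
      if result = [] ∧ cutIdx mc arr total = 0 ∧ arr ≠ [] then
        (match splitPostLine (arr.headD []) mc with
         | c :: _ => [c]
         | [] => [])
      else result ++ arr.take (cutIdx mc arr total) := by
  induction arr generalizing total result with
  | nil => simp [truncAGo, cutIdx]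
  | cons l rest ih =>
    simp only [truncAGo, cutIdx]
    by_cases h : total + lineLen l > mc
    · simp only [if_pos h]
      by_cases hr : result = []
      · subst hr
        simp only [List.headD_cons]
        cases splitPostLine l mc <;> simp
      · simp [hr]
    · simp only [if_neg h]
      rw [ih, if_neg (by simp)]
      simp

def prefixFrom (s : Int) : List Int → List Int
  | [] => []
  | L :: ls => (s + L) :: prefixFrom (s + L) ls

lemma foldl_prefix (ls : List Int) (s : Int) (acc : List Int) :
    (ls.foldl (fun (p : Int × List Int) L => (p.1 + L, p.2 ++ [p.1 + L])) (s, acc)).2 =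
      acc ++ prefixFrom s ls := by
  induction ls generalizing s acc with
  | nil => simp [prefixFrom]
  | cons L ls ih => simp [prefixFrom, ih]

lemma findIdx_prefix_eq_cutIdx (mc : Int) (arr : List (List (List (String × String)))) (s : Int) :
    (match (prefixFrom s (arr.map lineLen)).findIdx? (fun c => decide (c > mc)) with
     | some i => i
     | none => arr.length) = cutIdx mc arr s := by
  induction arr generalizing s with
  | nil => simp [prefixFrom, cutIdx]
  | cons l rest ih =>
    simp only [List.map_cons, prefixFrom, List.findIdx?_cons, cutIdx]
    by_cases h : s + lineLen l > mc
    · simp [h]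
    · simp only [decide_eq_true_eq] at *
      rw [if_neg h, if_neg h]
      rw [← ih (s + lineLen l)]
      cases (prefixFrom (s + lineLen l) (rest.map lineLen)).findIdx? (fun c => decide (c > mc)) <;> simp

-- the final flush of _split_post_line and its fold step, as named helpers for the lemmas
def finishSplit (st : List (List (List (String × String))) × List (List (String × String)) × Int) :
    List (List (List (String × String))) :=
  if st.2.1 ≠ [] then st.1 ++ [st.2.1] else st.1

def stepA (mc : Int)
    (st : List (List (List (String × String))) × List (List (String × String)) × Int)
    (seg : List (String × String)) :
    List (List (List (String × String))) × List (List (String × String)) × Int :=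
  let text := segText seg
  if text = "" then (st.1, st.2.1 ++ [seg], st.2.2)
  else splitSegLoop mc seg text text.toList.length 0 st.1 st.2.1 st.2.2

lemma splitPostLine_eq (line : List (List (String × String))) (mc : Int) :
    splitPostLine line mc = finishSplit (line.foldl (stepA mc) ([], [], 0)) := rfl

-- splitSegLoop only appends to the chunk list
lemma splitSegLoop_prefix (mc : Int) (seg : List (String × String)) (text : String) :
    ∀ (fuel : Nat) (pos : Int) chunks cur cc, ∃ Δ cur' cc',
      splitSegLoop mc seg text fuel pos chunks cur cc = (chunks ++ Δ, cur', cc') := by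
  intro fuel
  induction fuel with
  | zero => intro pos chunks cur cc; exact ⟨[], cur, cc, by simp [splitSegLoop]⟩
  | succ n ih =>
    intro pos chunks cur cc
    by_cases h : pos < PySem.Str.len text
    · simp only [splitSegLoop, if_pos h]
      by_cases hcc : cc ≥ mc
      · simp only [if_pos hcc]
        obtain ⟨Δ, cur', cc', hrec⟩ := ih _ (chunks ++ [cur]) _ _
        exact ⟨[cur] ++ Δ, cur', cc', by rw [hrec]; simp⟩
      · simp only [if_neg hcc]
        exact ih _ chunks _ _
    · exact ⟨[], cur, cc, by simp only [splitSegLoop]; rw [if_neg h]; simp⟩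

-- the fold of stepA only appends to the chunk list
lemma foldl_stepA_prefix (mc : Int) :
    ∀ (segs : List (List (String × String))) chunks cur cc, ∃ Δ cur' cc',
      segs.foldl (stepA mc) (chunks, cur, cc) = (chunks ++ Δ, cur', cc') := by
  intro segs
  induction segs with
  | nil => intro chunks cur cc; exact ⟨[], cur, cc, by simp⟩
  | cons seg rest ih =>
    intro chunks cur cc
    simp only [List.foldl_cons]
    by_cases h : segText seg = ""
    · simp only [stepA, if_pos h]
      exact ih chunks _ _
    · simp only [stepA, if_neg h]
      obtain ⟨Δ, cur', cc', h1⟩ := splitSegLoop_prefix mc seg (segText seg) _ 0 chunks cur cc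
      rw [h1]
      obtain ⟨Δ', cur'', cc'', h2⟩ := ih (chunks ++ Δ) cur' cc'
      exact ⟨Δ ++ Δ', cur'', cc'', by rw [h2]; simp⟩

-- once the chunk list is nonempty, its head is the head of the final result
lemma head_of_fold (mc : Int) (c0 : List (List (String × String)))
    (cs : List (List (List (String × String)))) (cur : List (List (String × String))) (cc : Int)
    (segs : List (List (String × String))) :
    (finishSplit (segs.foldl (stepA mc) (c0 :: cs, cur, cc))).headD [] = c0 := by
  obtain ⟨Δ, cur', cc', h⟩ := foldl_stepA_prefix mc segs (c0 :: cs) cur cc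
  rw [h]
  unfold finishSplit
  by_cases hc : cur' = [] <;> simp [hc]

-- at pos ≥ len(text) the while loop returns its state, whatever the fuel
lemma splitSegLoop_done (mc : Int) (seg : List (String × String)) (text : String)
    (fuel : Nat) (pos : Int) (chunks : List (List (List (String × String))))
    (cur : List (List (String × String))) (cc : Int) (h : ¬ pos < PySem.Str.len text) :
    splitSegLoop mc seg text fuel pos chunks cur cc = (chunks, cur, cc) := by
  cases fuel
  · rfl
  · simp only [splitSegLoop]; rw [if_neg h]

-- text[pos:pos+b] at pos = 0 is text[:b]
lemma slice_zero (text : String) (b : Int) :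
    PySem.Str.slice text (some 0) (some (0 + b)) = PySem.Str.slice text none (some b) := by
  apply String.toList_inj.mp
  rw [PySem.Str.toList_slice, PySem.Str.toList_slice, PySem.Chars.slice_eq_listSlice,
      PySem.Chars.slice_eq_listSlice, zero_add, PySem.List.slice_zero_start]

-- MAIN A↔B LEMMA (mc > 0): the first chunk of the full split is B's direct first-chunk computation
lemma firstChunk_eq (mc : Int) :
    ∀ (segs : List (List (String × String))) chunk used, 0 ≤ used → used ≤ mc →
      (finishSplit (segs.foldl (stepA mc) ([], chunk, used))).headD [] =
        firstChunkGo mc segs chunk used := by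
  intro segs
  induction segs with
  | nil =>
    intro chunk used _ _
    unfold finishSplit firstChunkGo
    by_cases hc : chunk = [] <;> simp [hc]
  | cons seg rest ih =>
    intro chunk used h0 h1
    simp only [List.foldl_cons, firstChunkGo]
    by_cases he : segText seg = ""
    · simp only [stepA, if_pos he]
      exact ih (chunk ++ [seg]) used h0 h1
    · simp only [stepA, if_neg he]
      have hn : 0 < (segText seg).toList.length := by
        rcases Nat.eq_zero_or_pos (segText seg).toList.length with h | h
        · exact absurd (String.toList_inj.mp (by simp [List.length_eq_zero_iff.mp h])) he
        · exact h
      obtain ⟨m, hm⟩ : ∃ m, (segText seg).toList.length = m + 1 :=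
        ⟨(segText seg).toList.length - 1, by omega⟩
      rw [hm]
      have hlen : PySem.Str.len (segText seg) = ((m + 1 : Nat) : Int) := by
        rw [PySem.Str.len_eq, hm]
      by_cases hu : used ≥ mc
      · -- immediate flush: the first chunk is fixed as 'chunk'
        simp only [if_pos hu, splitSegLoop, hlen]
        rw [if_pos (by push_cast; omega)]
        obtain ⟨Δ, cur', cc', hrec⟩ := splitSegLoop_prefix mc seg (segText seg) m _ ([] ++ [chunk]) _ _
        rw [hrec]
        simpa using head_of_fold mc chunk Δ cur' cc' rest
      · -- no flush: the seg (or its truncated part) joins the current chunk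
        simp only [if_neg hu, splitSegLoop, hlen]
        rw [if_pos (by push_cast; omega)]
        rw [slice_zero]
        set part := PySem.Str.slice (segText seg) none (some (mc - used)) with hpart
        have hplen : part.toList.length = min (mc - used).toNat (m + 1) := by
          rw [hpart, PySem.Str.toList_slice, PySem.Chars.slice_eq_listSlice,
              PySem.List.slice_to _ (by omega), List.length_take, hm]
        have hpl : PySem.Str.len part = (part.toList.length : Int) := PySem.Str.len_eq part
        by_cases hfit : (mc - used).toNat ≥ m + 1
        · -- whole text fits: loop ends, fold continues with the grown chunk
          have hplen' : part.toList.length = m + 1 := by omega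
          rw [hpl, hplen']
          rw [splitSegLoop_done mc seg (segText seg) m _ _ _ _ (by rw [hlen]; push_cast; omega)]
          rw [if_neg (by push_cast; omega)]
          exact ih _ _ (by push_cast; omega) (by push_cast; omega)
        · -- text is truncated: the loop flushes on the next step, first chunk fixed
          have hplen' : part.toList.length = (mc - used).toNat := by omega
          have hm1 : ∃ m', m = m' + 1 := ⟨m - 1, by omega⟩
          obtain ⟨m', hm'⟩ := hm1
          rw [hpl, hplen', hm']
          simp only [splitSegLoop]
          rw [if_pos (by rw [hlen, hm']; push_cast; omega)]
          rw [if_pos (by omega)]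
          rw [if_pos (by push_cast; omega)]
          obtain ⟨Δ, cur', cc', hrec⟩ :=
            splitSegLoop_prefix mc seg (segText seg) m' _ ([] ++ [chunk ++ [setSegText seg part]]) _ _
          rw [hrec]
          simpa using head_of_fold mc (chunk ++ [setSegText seg part]) Δ cur' cc' rest

-- B's first chunk is nonempty once the accumulated chunk is
lemma firstChunkGo_ne_nil_of_chunk (mc : Int) :
    ∀ (segs : List (List (String × String))) chunk used, chunk ≠ [] →
      firstChunkGo mc segs chunk used ≠ [] := by
  intro segs
  induction segs with
  | nil => intro chunk used hc; simpa [firstChunkGo] using hc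
  | cons seg rest ih =>
    intro chunk used hc
    simp only [firstChunkGo]
    by_cases he : segText seg = ""
    · simp only [if_pos he]; exact ih _ _ (by simp)
    · simp only [if_neg he]
      by_cases hu : used ≥ mc
      · simpa [hu] using hc
      · simp only [if_neg hu]
        by_cases hf : PySem.Str.len (PySem.Str.slice (segText seg) none (some (mc - used))) <
            PySem.Str.len (segText seg)
        · rw [if_pos hf]; simp
        · rw [if_neg hf]; exact ih _ _ (by simp)

-- with room left and a nonempty text among the segs, B's first chunk is nonempty
lemma firstChunkGo_ne_nil (mc : Int) (segs : List (List (String × String)))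
    (chunk : List (List (String × String))) (used : Int) (hu : used < mc)
    (hex : ∃ seg ∈ segs, segText seg ≠ "") : firstChunkGo mc segs chunk used ≠ [] := by
  induction segs generalizing chunk with
  | nil => simp at hex
  | cons seg rest ih =>
    simp only [firstChunkGo]
    by_cases he : segText seg = ""
    · simp only [if_pos he]
      refine ih (chunk ++ [seg]) ?_
      rcases hex with ⟨s, hs, hne⟩
      rcases List.mem_cons.mp hs with rfl | hs
      · exact absurd he hne
      · exact ⟨s, hs, hne⟩
    · simp only [if_neg he, if_neg (not_le.mpr hu)]
      by_cases hf : PySem.Str.len (PySem.Str.slice (segText seg) none (some (mc - used))) <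
          PySem.Str.len (segText seg)
      · rw [if_pos hf]; simp
      · rw [if_neg hf]
        exact firstChunkGo_ne_nil_of_chunk mc rest _ _ (by simp)

-- all-empty-text lines pass through both computations untouched
lemma foldl_stepA_all_empty (mc : Int) (segs : List (List (String × String)))
    (h : ∀ seg ∈ segs, segText seg = "") :
    ∀ chunks cur cc, segs.foldl (stepA mc) (chunks, cur, cc) = (chunks, cur ++ segs, cc) := by
  induction segs with
  | nil => intro chunks cur cc; simp
  | cons seg rest ih =>
    intro chunks cur cc
    have hs : segText seg = "" := h seg (by simp)
    simp only [List.foldl_cons, stepA, if_pos hs]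
    rw [ih (fun s hs' => h s (by simp [hs']))]
    simp

lemma firstChunkGo_all_empty (mc : Int) (segs : List (List (String × String)))
    (h : ∀ seg ∈ segs, segText seg = "") :
    ∀ chunk used, firstChunkGo mc segs chunk used = chunk ++ segs := by
  induction segs with
  | nil => intro chunk used; simp [firstChunkGo]
  | cons seg rest ih =>
    intro chunk used
    have hs : segText seg = "" := h seg (by simp)
    simp only [firstChunkGo, if_pos hs]
    rw [ih (fun s hs' => h s (by simp [hs']))]
    simp

lemma lineLen_all_empty (line : List (List (String × String)))
    (h : ∀ seg ∈ line, segText seg = "") : lineLen line = 0 := by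
  unfold lineLen
  induction line with
  | nil => simp
  | cons seg rest ih =>
    have hs : segText seg = "" := h seg (by simp)
    simp only [List.foldl_cons, hs]
    have : PySem.Str.len "" = 0 := by decide
    rw [this, add_zero]
    exact ih (fun s hs' => h s (by simp [hs']))

-- the fallback values agree on Pre_: A's split[0] equals B's direct first chunk
lemma fallback_eq (mc : Int) (h : List (List (String × String)))
    (t : List (List (List (String × String))))
    (hpre : Pre_truncate_post_array_py (h :: t) mc) (hcut : lineLen h > mc) :
    (match splitPostLine h mc with
     | c :: _ => [c]
     | [] => ([] : List (List (List (String × String))))) = [firstChunkGo mc h [] 0] := by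
  rcases hpre with hmc | habs | ⟨hmc, hlen0⟩ | ⟨hmc, _, hne, hall⟩
  · -- mc > 0: use the main lemma plus nonemptiness
    have hex : ∃ seg ∈ h, segText seg ≠ "" := by
      by_contra hno
      push Not at hno
      rw [lineLen_all_empty h (fun s hs => hno s hs)] at hcut
      omega
    have hhead := firstChunk_eq mc h [] 0 le_rfl (le_of_lt hmc)
    rw [splitPostLine_eq]
    have hnn := firstChunkGo_ne_nil mc h [] 0 hmc hex
    cases hsp : finishSplit (h.foldl (stepA mc) ([], [], 0)) with
    | nil =>
      rw [hsp] at hhead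
      simp only [List.headD_nil] at hhead
      exact absurd hhead.symm hnn
    | cons c cs => rw [hsp] at hhead; simp at hhead; simp [hhead]
  · exact absurd habs (by simp)
  · -- mc = 0 with a zero-length first line contradicts the overflow of the first line
    simp only [List.headD_cons] at hlen0
    omega
  · -- mc < 0 with a nonempty all-empty-text first line: both sides are [h]
    simp only [List.headD_cons] at hne hall
    rw [splitPostLine_eq, foldl_stepA_all_empty mc h hall [] [] 0]
    rw [firstChunkGo_all_empty mc h hall [] 0]
    unfold finishSplit
    simp [hne]

-- ===== VERDICT (by name: the statement is the Claim_ definition above) =====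
theorem truncate_post_array_py_spec : Claim_equal_truncate_post_array_py := by
  intro arr mc _ hpre
  unfold Spec_truncate_post_array_py truncate_post_array_py truncate_post_array_py_alt
  rw [truncAGo_eq]
  simp only [foldl_prefix, List.nil_append, findIdx_prefix_eq_cutIdx]
  by_cases h : cutIdx mc arr 0 = 0 ∧ arr ≠ []
  · rcases h with ⟨h0, hne⟩
    rw [if_pos (⟨by simp, h0, hne⟩ : _ ∧ _ ∧ _), if_pos ⟨h0, hne⟩]
    cases arr with
    | nil => exact absurd rfl hne
    | cons l rest =>
      have hcut : lineLen l > mc := by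
        by_contra hc
        unfold cutIdx at h0
        rw [if_neg (by omega : ¬ (0 + lineLen l > mc))] at h0
        exact Nat.succ_ne_zero _ h0
      simpa using fallback_eq mc l rest hpre hcut
  · rw [if_neg (fun hc => h ⟨hc.2.1, hc.2.2⟩), if_neg h]
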